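-- pv_equiv track=rewrite | github.com/munishaboora/cfg-MunishaKaurBoora-hw-assessment | MunishaKaurBoora_Specialisation_HW3.py | generate_phrase
-- ===== SOURCE A (Python) =====
-- def generate_phrase(characters, phrase):
--     phrase_index = 1
--
--     for letter in phrase:
--
--         if letter in characters:
--             index = characters.find(letter)
--             characters = characters[:index] + characters[index+1:]
--             phrase = phrase[:phrase_index-1] + phrase[phrase_index:]
--             phrase_index -= 1
--
--         phrase_index += 1
--
--     return phrase in characters
-- ===== SOURCE B (Python) =====
-- def generate_phrase(characters, phrase):
--     # count the available characters once
--     budget = {}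
--     for ch in characters:
--         budget[ch] = budget.get(ch, 0) + 1
--     # one pass over phrase: consume budget, collect unmatched letters
--     leftover = []
--     skip = {}
--     for ch in phrase:
--         if budget.get(ch, 0) > 0:
--             budget[ch] -= 1
--             skip[ch] = skip.get(ch, 0) + 1
--         else:
--             leftover.append(ch)
--     # one pass over characters: drop the first skip[c] occurrences of each c
--     remaining = []
--     for ch in characters:
--         if skip.get(ch, 0) > 0:
--             skip[ch] -= 1
--         else:
--             remaining.append(ch)
--     return ''.join(leftover) in ''.join(remaining)
-- ===== Notes on version B (the rewrite author's own statement) =====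
-- stated objective: faster
-- what changed: B replaces A's per-letter membership scan, find and double string slicing with one counting pass over characters, one budget-consuming pass over phrase collecting unmatched letters, and one pass rebuilding the remaining characters, then a single substring test.
import Mathlib
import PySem

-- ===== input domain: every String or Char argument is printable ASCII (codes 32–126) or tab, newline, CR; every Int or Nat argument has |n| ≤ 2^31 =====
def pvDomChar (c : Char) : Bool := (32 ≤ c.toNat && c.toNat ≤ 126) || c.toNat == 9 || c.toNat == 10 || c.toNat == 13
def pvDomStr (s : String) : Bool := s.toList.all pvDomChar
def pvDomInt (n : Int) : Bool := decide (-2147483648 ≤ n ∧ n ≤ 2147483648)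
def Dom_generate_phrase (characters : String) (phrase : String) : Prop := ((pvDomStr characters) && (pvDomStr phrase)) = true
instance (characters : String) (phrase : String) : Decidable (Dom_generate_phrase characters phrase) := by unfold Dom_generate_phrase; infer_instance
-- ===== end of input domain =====

-- B replaces A's per-letter scan/find/double-slice with three counting passes (budget, leftover, remaining) and one substring test.

-- ===== PORT A =====
-- A iterates over the ORIGINAL phrase string (the for-loop keeps the initial string),
-- while rebinding `characters`, `phrase` and `phrase_index` — they become the recursion state.
def generate_phrase_go : List Char → List Char → List Char → Int → Bool
  | [], chars, ph, _ => PySem.Chars.isIn ph chars                  -- return phrase in characters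
  | letter :: rest, chars, ph, idx =>
    if PySem.Chars.isIn [letter] chars then                        -- if letter in characters
      let index := PySem.Chars.find chars [letter]                 -- characters.find(letter)
      generate_phrase_go rest
        (PySem.List.slice chars none (some index) ++
         PySem.List.slice chars (some (index + 1)) none)           -- characters[:index] + characters[index+1:]
        (PySem.List.slice ph none (some (idx - 1)) ++
         PySem.List.slice ph (some idx) none)                      -- phrase[:phrase_index-1] + phrase[phrase_index:]
        ((idx - 1) + 1)                                            -- phrase_index -= 1; phrase_index += 1
    else
      generate_phrase_go rest chars ph (idx + 1)                   -- phrase_index += 1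

def generate_phrase (characters : String) (phrase : String) : Bool :=
  generate_phrase_go phrase.toList characters.toList phrase.toList 1

-- ===== PORT B =====
-- Source B's `d[ch] -= 1` / `d[ch] = d.get(ch, 0) + 1` are Dict.modify ch 0 (·∓1): exact, since
-- the decrement branch only runs when the key is present (getD > 0).
def generate_phrase_alt (characters : String) (phrase : String) : Bool :=
  let budget := characters.toList.foldl
      (fun (d : PySem.Dict Char Int) ch => d.modify ch 0 (· + 1)) PySem.Dict.empty
  let st := phrase.toList.foldl
      (fun (st : PySem.Dict Char Int × PySem.Dict Char Int × List Char) ch =>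
        if st.1.getD ch 0 > 0 then
          (st.1.modify ch 0 (· - 1), st.2.1.modify ch 0 (· + 1), st.2.2)
        else
          (st.1, st.2.1, st.2.2 ++ [ch]))
      (budget, PySem.Dict.empty, ([] : List Char))
  let fin := characters.toList.foldl
      (fun (p : PySem.Dict Char Int × List Char) ch =>
        if p.1.getD ch 0 > 0 then (p.1.modify ch 0 (· - 1), p.2)
        else (p.1, p.2 ++ [ch]))
      (st.2.1, ([] : List Char))
  PySem.Chars.isIn st.2.2 fin.2

-- ===== PRECONDITION & SPEC =====
def Spec_generate_phrase (characters : String) (phrase : String) (out : Bool) : Prop := out = generate_phrase_alt characters phrase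
instance (characters : String) (phrase : String) (out : Bool) : Decidable (Spec_generate_phrase characters phrase out) := by unfold Spec_generate_phrase; infer_instance

-- ===== CLAIM (what is proved, stated in full; the proofs are below) =====
def Claim_equal_generate_phrase : Prop := ∀ (characters : String) (phrase : String), Dom_generate_phrase characters phrase → Spec_generate_phrase characters phrase (generate_phrase characters phrase)

-- ===== LEMMAS AND PROOFS =====

-- Common abstract model: fold over the phrase, erasing matched letters and accumulating leftovers.
def pvStepM (st : List Char × List Char) (c : Char) : List Char × List Char :=
  if c ∈ st.1 then (st.1.erase c, st.2) else (st.1, st.2 ++ [c])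

-- Named copies of B's two fold bodies (definitionally equal to the lambdas in the port).
def pvStep2 (st : PySem.Dict Char Int × PySem.Dict Char Int × List Char) (ch : Char) :
    PySem.Dict Char Int × PySem.Dict Char Int × List Char :=
  if st.1.getD ch 0 > 0 then
    (st.1.modify ch 0 (· - 1), st.2.1.modify ch 0 (· + 1), st.2.2)
  else
    (st.1, st.2.1, st.2.2 ++ [ch])

def pvStep3 (p : PySem.Dict Char Int × List Char) (ch : Char) :
    PySem.Dict Char Int × List Char :=
  if p.1.getD ch 0 > 0 then (p.1.modify ch 0 (· - 1), p.2) else (p.1, p.2 ++ [ch])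

-- Abstract view of B's third pass: drop the first (f c) occurrences of each c.
def pvPruned (f : Char → Int) : List Char → List Char
  | [] => []
  | x :: xs => if f x > 0 then pvPruned (Function.update f x (f x - 1)) xs else x :: pvPruned f xs

theorem pv_update_nonneg (f : Char → Int) (x : Char) (v : Int) (hf : ∀ a, 0 ≤ f a)
    (hv : 0 ≤ v) (a : Char) : 0 ≤ Function.update f x v a := by
  rw [Function.update_apply]
  split
  · exact hv
  · exact hf a

theorem pv_singleton_infix (c : Char) (l : List Char) : [c] <:+: l ↔ c ∈ l := by
  constructor
  · intro h; exact h.mem (List.mem_singleton_self c)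
  · intro h
    obtain ⟨s, t, rfl⟩ := List.append_of_mem h
    exact ⟨s, t, by simp⟩

theorem pv_find_slices_erase (chars : List Char) (c : Char) (hmem : c ∈ chars) :
    PySem.List.slice chars none (some (PySem.Chars.find chars [c])) ++
      PySem.List.slice chars (some (PySem.Chars.find chars [c] + 1)) none = chars.erase c := by
  set i := PySem.Chars.find chars [c] with hi
  have hpos : 0 ≤ i := (PySem.Chars.find_nonneg_iff chars [c]).2 ((pv_singleton_infix c chars).2 hmem)
  obtain ⟨hpre, hmin⟩ := PySem.Chars.find_spec (s := chars) (sub := [c]) hpos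
  rw [← hi] at hpre hmin
  obtain ⟨t, ht⟩ := hpre
  have hd : chars.drop i.toNat = c :: t := by simpa using ht.symm
  have hget : chars[i.toNat]? = some c := by
    have h0 := List.getElem?_drop (xs := chars) (i := i.toNat) (j := 0)
    rw [hd] at h0
    simpa using h0.symm
  obtain ⟨hlt, heq⟩ := List.getElem?_eq_some_iff.1 hget
  have hidx : List.idxOf? c chars = some i.toNat := by
    rw [List.idxOf?_eq_some_iff]
    refine ⟨hlt, heq, ?_⟩
    intro j hj hjc
    refine hmin j hj ⟨chars.drop (j + 1), ?_⟩
    have hjlt : j < chars.length := lt_trans hj hlt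
    have hcd := List.getElem_cons_drop (as := chars) (i := j) hjlt
    rw [hjc] at hcd
    simpa using hcd
  have h1 : PySem.List.slice chars none (some i) = chars.take i.toNat :=
    PySem.List.slice_to chars hpos
  have h2 : PySem.List.slice chars (some (i + 1)) none = chars.drop (i.toNat + 1) := by
    rw [PySem.List.slice_from chars (by omega)]
    congr 1
    omega
  rw [h1, h2, ← List.eraseIdx_eq_take_drop_succ, List.erase_eq_eraseIdx, hidx]

theorem pvPruned_zero (xs : List Char) : pvPruned (fun _ => (0 : Int)) xs = xs := by
  induction xs with
  | nil => rfl
  | cons x xs ih => simp [pvPruned, ih]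

theorem pvPruned_bump (xs : List Char) (f : Char → Int) (hf : ∀ a, 0 ≤ f a) (c : Char)
    (hc : c ∈ pvPruned f xs) :
    pvPruned (Function.update f c (f c + 1)) xs = (pvPruned f xs).erase c := by
  induction xs generalizing f with
  | nil => simp [pvPruned] at hc
  | cons x xs ih =>
    by_cases hx : x = c
    · subst hx
      by_cases hfx : f x > 0
      · -- a skipped occurrence of x: both sides skip it and recurse
        have hc' : x ∈ pvPruned (Function.update f x (f x - 1)) xs := by
          simpa [pvPruned, hfx] using hc
        have hIH := ih (Function.update f x (f x - 1))
          (fun a => pv_update_nonneg f x (f x - 1) hf (by omega) a) hc'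
        rw [Function.update_self, Function.update_idem,
          show f x - 1 + 1 = f x by ring, Function.update_eq_self] at hIH
        have hpos' : Function.update f x (f x + 1) x > 0 := by
          rw [Function.update_self]; omega
        simp only [pvPruned]
        rw [if_pos hpos', if_pos hfx, Function.update_self, Function.update_idem,
          show f x + 1 - 1 = f x by ring, Function.update_eq_self]
        exact hIH
      · -- f x = 0: x is kept on the right and erased; the bumped count skips it on the left
        have hpos' : Function.update f x (f x + 1) x > 0 := by
          rw [Function.update_self]
          have := hf x; omega
        simp only [pvPruned]
        rw [if_pos hpos', if_neg hfx, Function.update_self, Function.update_idem,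
          show f x + 1 - 1 = f x by ring, Function.update_eq_self, List.erase_cons_head]
    · -- x ≠ c: the bump at c does not affect the test at x
      have hne : Function.update f c (f c + 1) x = f x := Function.update_of_ne hx _ _
      by_cases hfx : f x > 0
      · have hc' : c ∈ pvPruned (Function.update f x (f x - 1)) xs := by
          simpa [pvPruned, hfx] using hc
        have hIH := ih (Function.update f x (f x - 1))
          (fun a => pv_update_nonneg f x (f x - 1) hf (by omega) a) hc'
        rw [Function.update_of_ne (Ne.symm hx)] at hIH
        simp only [pvPruned]
        rw [if_pos (by rw [hne]; exact hfx), if_pos hfx, hne,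
          Function.update_comm (Ne.symm hx)]
        exact hIH
      · have hc' : c ∈ pvPruned f xs := by
          have h0 := hc
          simp only [pvPruned, hfx, ite_false, List.mem_cons] at h0
          rcases h0 with h | h
          · exact absurd h.symm hx
          · exact h
        simp only [pvPruned]
        rw [if_neg (by rw [hne]; exact hfx), if_neg hfx, ih f hf hc',
          List.erase_cons_tail (by simpa using hx)]

theorem pv_fold3_eq (xs : List Char) (d : PySem.Dict Char Int) (acc : List Char) :
    (xs.foldl pvStep3 (d, acc)).2 = acc ++ pvPruned (fun a => d.getD a 0) xs := by
  induction xs generalizing d acc with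
  | nil => simp [pvPruned]
  | cons x xs ih =>
    rw [List.foldl_cons]
    by_cases hx : d.getD x 0 > 0
    · rw [show pvStep3 (d, acc) x = (d.modify x 0 (· - 1), acc) by simp [pvStep3, hx], ih]
      have hfun : (fun a => (d.modify x 0 (· - 1)).getD a 0)
          = Function.update (fun a => d.getD a 0) x ((fun a => d.getD a 0) x - 1) := by
        funext a
        rw [PySem.Dict.getD_modify, Function.update_apply]
      rw [hfun]
      simp [pvPruned, hx]
    · rw [show pvStep3 (d, acc) x = (d, acc ++ [x]) by simp [pvStep3, hx], ih]
      simp [pvPruned, hx]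

theorem pv_main_inv (rem : List Char) (lchars chars left : List Char)
    (budget skip : PySem.Dict Char Int)
    (hb : ∀ a, budget.getD a 0 = (chars.count a : Int))
    (hs : ∀ a, 0 ≤ skip.getD a 0)
    (hp : pvPruned (fun a => skip.getD a 0) lchars = chars) :
    (rem.foldl pvStep2 (budget, skip, left)).2.2 = (rem.foldl pvStepM (chars, left)).2
    ∧ (∀ a, 0 ≤ (rem.foldl pvStep2 (budget, skip, left)).2.1.getD a 0)
    ∧ pvPruned (fun a => (rem.foldl pvStep2 (budget, skip, left)).2.1.getD a 0) lchars
        = (rem.foldl pvStepM (chars, left)).1 := by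
  induction rem generalizing chars left budget skip with
  | nil => exact ⟨rfl, hs, hp⟩
  | cons c rest ih =>
    rw [List.foldl_cons, List.foldl_cons]
    by_cases hmem : c ∈ chars
    · have hpos : budget.getD c 0 > 0 := by
        rw [hb c]
        exact_mod_cast List.count_pos_iff.2 hmem
      rw [show pvStep2 (budget, skip, left) c
          = (budget.modify c 0 (· - 1), skip.modify c 0 (· + 1), left) by simp [pvStep2, hpos],
        show pvStepM (chars, left) c = (chars.erase c, left) by simp [pvStepM, hmem]]
      apply ih
      · intro a
        rw [PySem.Dict.getD_modify]
        rcases eq_or_ne a c with rfl | h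
        · rw [if_pos rfl]
          show budget.getD a 0 - 1 = _
          rw [hb a, List.count_erase_self]
          have h1 : 0 < chars.count a := List.count_pos_iff.2 hmem
          omega
        · rw [if_neg h, hb a, List.count_erase_of_ne h]
      · intro a
        rw [PySem.Dict.getD_modify]
        rcases eq_or_ne a c with rfl | h
        · rw [if_pos rfl]
          show 0 ≤ skip.getD a 0 + 1
          have := hs a; omega
        · rw [if_neg h]; exact hs a
      · have hfun : (fun a => (skip.modify c 0 (· + 1)).getD a 0)
            = Function.update (fun a => skip.getD a 0) c ((fun a => skip.getD a 0) c + 1) := by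
          funext a
          rw [PySem.Dict.getD_modify, Function.update_apply]
        rw [hfun, pvPruned_bump lchars _ hs c (by rw [hp]; exact hmem), hp]
    · have hzero : ¬ budget.getD c 0 > 0 := by
        rw [hb c]
        have h0 : chars.count c = 0 := by
          by_contra h
          exact hmem (List.count_pos_iff.1 (Nat.pos_of_ne_zero h))
        simp [h0]
      rw [show pvStep2 (budget, skip, left) c = (budget, skip, left ++ [c]) by simp [pvStep2, hzero],
        show pvStepM (chars, left) c = (chars, left ++ [c]) by simp [pvStepM, hmem]]
      exact ih chars (left ++ [c]) budget skip hb hs hp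

theorem pv_goA_eq (rem : List Char) (chars left : List Char) :
    generate_phrase_go rem chars (left ++ rem) ((left.length : Int) + 1)
      = PySem.Chars.isIn (rem.foldl pvStepM (chars, left)).2
          (rem.foldl pvStepM (chars, left)).1 := by
  induction rem generalizing chars left with
  | nil => simp [generate_phrase_go]
  | cons c rest ih =>
    by_cases hmem : c ∈ chars
    · have htest : PySem.Chars.isIn [c] chars = true :=
        (PySem.Chars.isIn_iff_infix [c] chars).2 ((pv_singleton_infix c chars).2 hmem)
      simp only [generate_phrase_go, htest, if_pos]
      have h1 : PySem.List.slice (left ++ c :: rest) none (some ((left.length : Int) + 1 - 1))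
          = left := by
        rw [show (left.length : Int) + 1 - 1 = ((left.length : Nat) : Int) by ring,
          PySem.List.slice_to _ (by positivity)]
        simp
      have h2 : PySem.List.slice (left ++ c :: rest) (some ((left.length : Int) + 1)) none
          = rest := by
        rw [PySem.List.slice_from _ (by positivity)]
        rw [show ((left.length : Int) + 1).toNat = (left ++ [c]).length by simp,
          show left ++ c :: rest = (left ++ [c]) ++ rest by simp, List.drop_left]
      rw [h1, h2, pv_find_slices_erase chars c hmem,
        show (left.length : Int) + 1 - 1 + 1 = (left.length : Int) + 1 by ring, ih]
      rw [List.foldl_cons, show pvStepM (chars, left) c = (chars.erase c, left) by simp [pvStepM, hmem]]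
    · have htest : PySem.Chars.isIn [c] chars = false := by
        rw [PySem.Chars.isIn_eq_false_iff]
        intro h
        exact hmem ((pv_singleton_infix c chars).1 h)
      simp only [generate_phrase_go, htest, Bool.false_eq_true, if_false]
      rw [show left ++ c :: rest = (left ++ [c]) ++ rest by simp,
        show (left.length : Int) + 1 + 1 = (((left ++ [c]).length : Nat) : Int) + 1 by simp,
        ih]
      rw [List.foldl_cons, show pvStepM (chars, left) c = (chars, left ++ [c]) by simp [pvStepM, hmem]]

-- ===== VERDICT (by name: the statement is the Claim_ definition above) =====
theorem generate_phrase_spec : Claim_equal_generate_phrase := by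
  unfold Claim_equal_generate_phrase
  intro characters phrase _
  unfold Spec_generate_phrase
  have hA : generate_phrase characters phrase
      = PySem.Chars.isIn (phrase.toList.foldl pvStepM (characters.toList, [])).2
          (phrase.toList.foldl pvStepM (characters.toList, [])).1 := by
    have h := pv_goA_eq phrase.toList characters.toList []
    simpa [generate_phrase] using h
  have hB : generate_phrase_alt characters phrase
      = PySem.Chars.isIn
          (phrase.toList.foldl pvStep2
            (characters.toList.foldl
              (fun (d : PySem.Dict Char Int) ch => d.modify ch 0 (· + 1)) PySem.Dict.empty,
             PySem.Dict.empty, ([] : List Char))).2.2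
          (characters.toList.foldl pvStep3
            ((phrase.toList.foldl pvStep2
              (characters.toList.foldl
                (fun (d : PySem.Dict Char Int) ch => d.modify ch 0 (· + 1)) PySem.Dict.empty,
               PySem.Dict.empty, ([] : List Char))).2.1, ([] : List Char))).2 := rfl
  have hb : ∀ a, (characters.toList.foldl
      (fun (d : PySem.Dict Char Int) ch => d.modify ch 0 (· + 1)) PySem.Dict.empty).getD a 0
      = (characters.toList.count a : Int) := by
    intro a
    rw [PySem.Dict.getD_foldl_modify_add_one, PySem.Dict.getD_empty]
    ring
  have hs : ∀ a, 0 ≤ (PySem.Dict.empty : PySem.Dict Char Int).getD a 0 := by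
    intro a
    rw [PySem.Dict.getD_empty]
  have hp : pvPruned (fun a => (PySem.Dict.empty : PySem.Dict Char Int).getD a 0)
      characters.toList = characters.toList := by
    rw [show (fun a => (PySem.Dict.empty : PySem.Dict Char Int).getD a 0)
        = fun _ => (0 : Int) from funext fun a => PySem.Dict.getD_empty a 0, pvPruned_zero]
  obtain ⟨h1, h2, h3⟩ := pv_main_inv phrase.toList characters.toList characters.toList []
    _ PySem.Dict.empty hb hs hp
  rw [hA, hB, pv_fold3_eq, h1, h3, List.nil_append]
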